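-- pv_equiv track=rewrite | github.com/OfficialARM17/PreLearningAnswers | challenge_4_task_2.py | boredom_assessment
-- ===== SOURCE A (Python) =====
-- def boredom_assessment(staff):
--     # Department boredom scores
--     boredom_scores = {
--         'accounts': 1,
--         'finance': 2,
--         'canteen': 10,
--         'regulation': 3,
--         'trading': 6,
--         'change': 6,
--         'IS': 8,
--         'retail': 5,
--         'cleaning': 4,
--         'pissing about': 25
--     }
--
--     # Calculate the total boredom score for the staff
--     total_boredom = sum(boredom_scores[staff[person]] for person in staff)
--
--     # Return the appropriate message based on the total score
--     if total_boredom <= 80: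
--         return 'kill me now'
--     elif total_boredom < 100:
--         return 'i can handle this'
--     else:
--         return 'party time!!'
-- ===== SOURCE B (Python) =====
-- def boredom_assessment(staff):
--     # Department boredom scores
--     boredom_scores = {
--         'accounts': 1,
--         'finance': 2,
--         'canteen': 10,
--         'regulation': 3,
--         'trading': 6,
--         'change': 6,
--         'IS': 8,
--         'retail': 5,
--         'cleaning': 4,
--         'pissing about': 25
--     }
--
--     # Tabulate: how many staff members each department has
--     counts = {}
--     for dept in staff.values():
--         counts[dept] = counts.get(dept, 0) + 1
--
--     # Accumulate the weighted total over distinct departments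
--     total = 0
--     for dept, n in counts.items():
--         total += n * boredom_scores[dept]
--
--     # Walk a threshold ladder instead of an if/elif chain
--     for limit, message in ((80, 'kill me now'), (99, 'i can handle this')):
--         if total <= limit:
--             return message
--     return 'party time!!'
-- ===== Notes on version B (the rewrite author's own statement) =====
-- stated objective: alternative
-- what changed: B tabulates a frequency table of departments first and then accumulates the total as a weighted sum count*score over distinct departments (instead of A's per-person generator sum), and selects the message by walking a (limit, message) threshold table instead of the if/elif chain.
import Mathlib
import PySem

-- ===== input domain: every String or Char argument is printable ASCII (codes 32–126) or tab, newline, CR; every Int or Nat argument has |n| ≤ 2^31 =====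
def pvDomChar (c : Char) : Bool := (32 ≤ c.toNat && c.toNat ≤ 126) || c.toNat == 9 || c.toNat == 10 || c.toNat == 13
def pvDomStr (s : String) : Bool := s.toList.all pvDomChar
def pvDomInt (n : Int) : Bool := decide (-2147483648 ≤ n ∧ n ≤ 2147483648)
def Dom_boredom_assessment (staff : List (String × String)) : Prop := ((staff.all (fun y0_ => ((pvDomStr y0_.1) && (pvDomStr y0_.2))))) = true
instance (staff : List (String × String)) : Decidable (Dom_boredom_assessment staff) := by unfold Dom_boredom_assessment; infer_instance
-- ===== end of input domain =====

-- B tabulates department head counts first, accumulates the total as a weighted sum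
-- over distinct departments, and picks the message by walking a threshold table
-- (objective: alternative decomposition; return value proved equal on Pre_).

-- The shared literal dict of boredom scores (both Pythons define the same literal).
def pvScores : PySem.Dict String Int :=
  PySem.Dict.ofList [("accounts", 1), ("finance", 2), ("canteen", 10), ("regulation", 3),
    ("trading", 6), ("change", 6), ("IS", 8), ("retail", 5), ("cleaning", 4), ("pissing about", 25)]

-- ===== PORT A =====
-- sum(boredom_scores[staff[person]] for person in staff); none = KeyError
def pvSumA : List (String × String) → Option Int
  | [] => some 0
  | (_, d) :: t =>
    match pvScores.get? d, pvSumA t with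
    | some v, some s => some (v + s)
    | _, _ => none

def boredom_assessment (staff : List (String × String)) : String :=
  match pvSumA staff with
  | none => ""   -- KeyError: excluded by Pre_
  | some total =>
    if total ≤ 80 then "kill me now"
    else if total < 100 then "i can handle this"
    else "party time!!"

-- ===== PORT B =====
-- for dept, n in counts.items(): total += n * boredom_scores[dept]; none = KeyError
def pvAccB (acc : Option Int) (p : String × Int) : Option Int :=
  acc.bind fun t => (pvScores.get? p.1).map fun v => t + p.2 * v

-- for limit, message in ((80,'kill me now'),(99,'i can handle this')): if total <= limit: return message
def pvLadder : List (Int × String) := [(80, "kill me now"), (99, "i can handle this")]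

def pvPick (total : Int) : List (Int × String) → String
  | [] => "party time!!"
  | (limit, message) :: rest => if total ≤ limit then message else pvPick total rest

def boredom_assessment_alt (staff : List (String × String)) : String :=
  match ((staff.map (·.2)).foldl
      (fun d x => d.insert x (d.getD x 0 + 1)) PySem.Dict.empty).items.foldl
      pvAccB (some 0) with
  | none => ""   -- KeyError: excluded by Pre_
  | some total => pvPick total pvLadder

-- ===== PRECONDITION & SPEC =====
-- Pre_ excludes exactly the inputs on which A raises KeyError: a staff member whose
-- department is not a key of boredom_scores.
def Pre_boredom_assessment (staff : List (String × String)) : Prop :=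
  ∀ p ∈ staff, p.2 ∈ ["accounts", "finance", "canteen", "regulation", "trading",
    "change", "IS", "retail", "cleaning", "pissing about"]
instance (staff : List (String × String)) : Decidable (Pre_boredom_assessment staff) := by
  unfold Pre_boredom_assessment; infer_instance

def pvWitness_boredom_assessment : (List (String × String)) :=
  [("alice", "canteen"), ("bob", "IS"), ("carol", "canteen")]

def Spec_boredom_assessment (staff : List (String × String)) (out : String) : Prop := out = boredom_assessment_alt staff
instance (staff : List (String × String)) (out : String) : Decidable (Spec_boredom_assessment staff out) := by unfold Spec_boredom_assessment; infer_instance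

-- ===== CLAIM =====
def Claim_equal_boredom_assessment : Prop := ∀ (staff : List (String × String)), Dom_boredom_assessment staff → Pre_boredom_assessment staff → Spec_boredom_assessment staff (boredom_assessment staff)

-- ===== LEMMAS AND PROOFS =====

def pvKeys : List String := ["accounts", "finance", "canteen", "regulation", "trading",
    "change", "IS", "retail", "cleaning", "pissing about"]

-- score as a total function (used only inside the proofs)
def pvF (d : String) : Int := (pvScores.get? d).getD 0

lemma pvGet_of_mem {d : String} (h : d ∈ pvKeys) : pvScores.get? d = some (pvF d) := by
  simp only [pvKeys, List.mem_cons, List.not_mem_nil, or_false] at h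
  rcases h with h | h | h | h | h | h | h | h | h | h <;> subst h <;> decide

lemma pvSumA_eq (xs : List (String × String)) (h : ∀ p ∈ xs, p.2 ∈ pvKeys) :
    pvSumA xs = some ((xs.map (fun p => pvF p.2)).sum) := by
  induction xs with
  | nil => rfl
  | cons p t ih =>
    have hp := pvGet_of_mem (h p (by simp))
    have ht := ih (fun q hq => h q (by simp [hq]))
    simp [pvSumA, hp, ht]

lemma pvFoldB_eq (cnt : String → Int) (ks : List String) (t0 : Int)
    (h : ∀ k ∈ ks, k ∈ pvKeys) :
    (ks.map (fun k => (k, cnt k))).foldl pvAccB (some t0)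
      = some (t0 + (ks.map (fun k => cnt k * pvF k)).sum) := by
  induction ks generalizing t0 with
  | nil => simp
  | cons k t ih =>
    have hk := pvGet_of_mem (h k (by simp))
    have ht := ih (t0 + cnt k * pvF k) (fun q hq => h q (by simp [hq]))
    simp only [List.map_cons, List.foldl_cons, pvAccB, hk, Option.bind_some,
      Option.map_some, ht, List.sum_cons]
    ring_nf

lemma pv_pick_eq (total : Int) :
    pvPick total pvLadder
      = (if total ≤ 80 then "kill me now"
         else if total < 100 then "i can handle this"
         else "party time!!") := by
  simp only [pvLadder, pvPick]
  by_cases h1 : total ≤ 80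
  · simp [h1]
  · by_cases h2 : total < 100
    · have : total ≤ 99 := by omega
      simp [h1, h2, this]
    · have : ¬ total ≤ 99 := by omega
      simp [h1, h2, this]

lemma pv_sum_if (l : List String) (x : String) (f : String → Int)
    (hx : x ∈ l) (hnd : l.Nodup) :
    (l.map (fun k => if k = x then f k else 0)).sum = f x := by
  induction l with
  | nil => cases hx
  | cons a t ih =>
    rcases List.nodup_cons.mp hnd with ⟨ha, hndt⟩
    rcases List.mem_cons.mp hx with rfl | h
    · have hz : (t.map (fun k => if k = x then f k else 0)).sum = 0 := by
        apply List.sum_eq_zero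
        intro y hy
        rcases List.mem_map.mp hy with ⟨k, hk, rfl⟩
        have hne : k ≠ x := fun e => ha (e ▸ hk)
        simp [hne]
      simp [hz]
    · have hne : a ≠ x := fun e => ha (e ▸ h)
      simp [hne, ih h hndt]

-- tabulate-then-weight equals the plain sum
lemma pv_weight_sum (xs : List String) (l : List String) (f : String → Int)
    (hsub : ∀ x ∈ xs, x ∈ l) (hnd : l.Nodup) :
    (xs.map f).sum = (l.map (fun k => (xs.count k : Int) * f k)).sum := by
  induction xs with
  | nil => simp
  | cons x t ih =>
    have hsub' : ∀ y ∈ t, y ∈ l := fun y hy => hsub y (by simp [hy])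
    have split : ∀ k : String,
        ((List.count k (x :: t) : Int)) * f k
          = (t.count k : Int) * f k + (if k = x then f k else 0) := by
      intro k
      by_cases h : k = x
      · subst h
        have hc : List.count k (k :: t) = List.count k t + 1 := by
          simp
        rw [hc]; push_cast; simp; ring
      · have hxk : ¬ x = k := fun e => h e.symm
        have hc : List.count k (x :: t) = List.count k t := by
          simp [hxk]
        rw [hc]; simp [h]
    calc ((x :: t).map f).sum = f x + (t.map f).sum := by simp
      _ = (l.map (fun k => (t.count k : Int) * f k)).sum
            + (l.map (fun k => if k = x then f k else 0)).sum := by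
            rw [ih hsub', pv_sum_if l x f (hsub x (by simp)) hnd]; ring
      _ = (l.map (fun k => ((x :: t).count k : Int) * f k)).sum := by
            rw [← List.sum_map_add]
            congr 1
            exact (List.map_congr_left (fun k _ => (split k).symm))

theorem boredom_assessment_spec : Claim_equal_boredom_assessment := by
  intro staff _ hpre
  unfold Spec_boredom_assessment boredom_assessment boredom_assessment_alt
  have hdep : ∀ x ∈ staff.map (·.2), x ∈ pvKeys := by
    intro x hx
    rcases List.mem_map.mp hx with ⟨p, hp, rfl⟩
    exact hpre p hp
  -- the counting loop is Counter
  rw [PySem.Dict.foldl_insert_getD_add_one_eq_counter (staff.map (·.2))]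
  rw [PySem.Dict.items_counter]
  have hsubK : ∀ k ∈ PySem.Set.ofList (staff.map (·.2)), k ∈ pvKeys := by
    intro k hk
    exact hdep k ((PySem.Set.mem_ofList _ _).mp hk)
  rw [pvFoldB_eq (fun k => ((staff.map (·.2)).count k : Int)) _ 0 hsubK]
  rw [pvSumA_eq staff hpre]
  have hA : (staff.map (fun p => pvF p.2)).sum
      = ((staff.map (·.2)).map pvF).sum := by
    rw [List.map_map]; rfl
  rw [show (staff.map (fun p => pvF p.2)).sum
      = ((PySem.Set.ofList (staff.map (·.2))).map
          (fun k => ((staff.map (·.2)).count k : Int) * pvF k)).sum from by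
    rw [hA]
    exact pv_weight_sum (staff.map (·.2)) _ pvF
      (fun x hx => (PySem.Set.mem_ofList _ _).mpr hx)
      (PySem.Set.nodup_ofList _)]
  simp only [zero_add, pv_pick_eq]
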